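-- pv_equiv track=rewrite | github.com/JingxinLi/Viterbi-Algorithem | PA1new.py | sentence_iterator
-- ===== SOURCE A (Python) =====
-- def sentence_iterator(file_itr):
-- 	sentence = []
-- 	for l in file_itr:
-- 		if l == (None):
-- 			# end of a sentence
-- 			if sentence: # yield non-empty sentence
-- 				yield(sentence)
-- 				sentence = []
-- 		else:
-- 			sentence.append(l)
-- 	if sentence: # in case, the file ends without empty line
-- 		yield(sentence)
-- ===== SOURCE B (Python) =====
-- def sentence_iterator(file_itr):
--     toks = list(file_itr)
--     n = len(toks)
--     i = 0
--     while i < n: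
--         if toks[i] == None:
--             i += 1
--         else:
--             j = i
--             while j < n and toks[j] != None:
--                 j += 1
--             yield toks[i:j]
--             i = j
-- ===== Notes on version B (the rewrite author's own statement) =====
-- stated objective: alternative
-- what changed: Replaces A's buffer-accumulate-and-flush loop with a two-pointer span scan that skips None runs and yields each maximal non-None run as a slice.
import Mathlib
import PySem

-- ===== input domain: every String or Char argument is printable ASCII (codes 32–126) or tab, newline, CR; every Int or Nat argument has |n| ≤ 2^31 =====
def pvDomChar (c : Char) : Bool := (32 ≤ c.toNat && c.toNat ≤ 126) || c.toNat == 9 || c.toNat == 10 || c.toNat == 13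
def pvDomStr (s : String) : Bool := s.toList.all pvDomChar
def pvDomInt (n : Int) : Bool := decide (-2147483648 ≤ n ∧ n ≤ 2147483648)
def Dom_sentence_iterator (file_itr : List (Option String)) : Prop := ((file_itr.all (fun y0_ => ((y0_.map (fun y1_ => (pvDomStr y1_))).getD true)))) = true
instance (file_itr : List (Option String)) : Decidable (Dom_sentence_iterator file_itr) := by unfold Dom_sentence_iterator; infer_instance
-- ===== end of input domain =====

-- B replaces A's sentence-buffer flush loop with a two-pointer span scan over maximal non-None runs (alternative decomposition, same cost).


-- ===== PORT A =====
-- A: accumulate tokens into `sentence`, flush on None (if non-empty), final flush after the loop.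
def sentenceGoA (sentence : List String) : List (Option String) → List (List String)
  | [] => if sentence = [] then [] else [sentence]
  | l :: rest =>
    match l with
    | none => if sentence = [] then sentenceGoA [] rest else sentence :: sentenceGoA [] rest
    | some s => sentenceGoA (sentence ++ [s]) rest

def sentence_iterator (file_itr : List (Option String)) : List (List String) :=
  sentenceGoA [] file_itr

-- ===== PORT B =====
-- B: skip None, otherwise take the maximal non-None run (the inner `while j` scan / toks[i:j]) and continue after it.
def sentenceSpan : List (Option String) → List String × List (Option String)
  | some s :: rest => let (g, r) := sentenceSpan rest; (s :: g, r)
  | l => ([], l)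

theorem sentenceSpan_len : ∀ l : List (Option String), (sentenceSpan l).2.length ≤ l.length
  | [] => by simp [sentenceSpan]
  | none :: _ => by simp [sentenceSpan]
  | some s :: rest => by
    simpa [sentenceSpan] using Nat.le_succ_of_le (sentenceSpan_len rest)

def sentence_iterator_alt : List (Option String) → List (List String)
  | [] => []
  | none :: rest => sentence_iterator_alt rest
  | some s :: rest =>
    (s :: (sentenceSpan rest).1) :: sentence_iterator_alt (sentenceSpan rest).2
termination_by l => l.length
decreasing_by
  · simp
  · have := sentenceSpan_len rest; simp; omega

-- ===== PRECONDITION & SPEC =====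
def Spec_sentence_iterator (file_itr : List (Option String)) (out : List (List String)) : Prop := out = sentence_iterator_alt file_itr
instance (file_itr : List (Option String)) (out : List (List String)) : Decidable (Spec_sentence_iterator file_itr out) := by unfold Spec_sentence_iterator; infer_instance

-- ===== CLAIM (what is proved, stated in full; the proofs are below) =====
def Claim_equal_sentence_iterator : Prop := ∀ (file_itr : List (Option String)), Dom_sentence_iterator file_itr → Spec_sentence_iterator file_itr (sentence_iterator file_itr)

-- ===== LEMMAS AND PROOFS =====
theorem sentenceGoA_eq (l : List (Option String)) : ∀ acc : List String,
    sentenceGoA acc l =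
      if acc = [] then sentence_iterator_alt l
      else (acc ++ (sentenceSpan l).1) :: sentence_iterator_alt (sentenceSpan l).2 := by
  induction l with
  | nil =>
    intro acc
    by_cases h : acc = [] <;> simp [sentenceGoA, sentenceSpan, sentence_iterator_alt, h]
  | cons hd rest ih =>
    intro acc
    cases hd with
    | none =>
      by_cases h : acc = [] <;>
        simp [sentenceGoA, sentenceSpan, sentence_iterator_alt, h, ih]
    | some s =>
      by_cases h : acc = []
      · subst h
        simpa [sentenceGoA, sentenceSpan, sentence_iterator_alt] using ih [s]
      · have h2 := ih (acc ++ [s])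
        simp [sentenceGoA, sentenceSpan, sentence_iterator_alt, h, h2]

-- ===== VERDICT (by name: the statement is the Claim_ definition above) =====
theorem sentence_iterator_spec : Claim_equal_sentence_iterator := by
  intro l _
  unfold Spec_sentence_iterator sentence_iterator
  simp [sentenceGoA_eq]
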